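-- pv_equiv track=rewrite | github.com/manuzrpEd/PythonCodeChallenges | StringSymmetryIndex.py | solution
-- ===== SOURCE A (Python) =====
-- def solution(S):
--     if S=='':
--         return -1
--     if len(S)==1:
--         return 0
--     if (len(S) % 2) == 0:
--         return -1
--     else:
--         midpoint = int((len(S)+1)/2) - 1
--         first = S[0:midpoint]
--         second = S[midpoint+1:]
--         second_inv = list(second)
--         inverted = []
--         for i in range(len(second_inv)-1,-1,-1):
--             inverted.append(second_inv[i])
--         inverted = "".join(inverted)
--         if inverted==first:
--             return midpoint
--         else:
--             return -1
-- ===== SOURCE B (Python) =====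
-- def solution(S):
--     n = len(S)
--     if n == 0:
--         return -1
--     if n == 1:
--         return 0
--     if n % 2 == 0:
--         return -1
--     m = (n - 1) // 2
--     for i in range(m):
--         if S[i] != S[n - 1 - i]:
--             return -1
--     return m
-- ===== Notes on version B (the rewrite author's own statement) =====
-- stated objective: simpler
-- what changed: Replaces the slice-copy / manual-reverse / string-rebuild comparison with a direct two-pointer scan comparing S[i] to S[n-1-i] with early exit, building no intermediate lists or strings.
import Mathlib
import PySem

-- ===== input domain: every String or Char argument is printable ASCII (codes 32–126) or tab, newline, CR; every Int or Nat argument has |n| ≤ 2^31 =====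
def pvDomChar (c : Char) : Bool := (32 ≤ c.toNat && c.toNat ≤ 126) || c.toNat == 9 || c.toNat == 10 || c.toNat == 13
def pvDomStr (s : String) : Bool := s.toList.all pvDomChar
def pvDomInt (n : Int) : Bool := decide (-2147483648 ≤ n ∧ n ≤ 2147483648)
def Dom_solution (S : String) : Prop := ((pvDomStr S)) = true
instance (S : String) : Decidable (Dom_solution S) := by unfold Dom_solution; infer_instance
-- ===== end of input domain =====

-- B replaces A's slice-copy / manual-reverse / string-rebuild comparison by a direct
-- two-pointer scan comparing S[i] with S[n-1-i] with early exit (simpler, no intermediate structures).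

-- ===== PORT A =====
-- Python's `int((len(S)+1)/2)` is float truncation of an exact half-integer quotient;
-- on the reachable branch len(S) is odd, so it equals floor division, ported as PySem.Int.floordiv.
-- Indices into `second` drawn from range(len(second)-1,-1,-1) are always in range, so pyGetD's default is never used.
def solution (S : String) : Int :=
  let l := S.toList
  if l = [] then -1
  else if l.length = 1 then 0
  else if (l.length : Int) % 2 = 0 then -1
  else
    let midpoint : Int := PySem.Int.floordiv ((l.length : Int) + 1) 2 - 1
    let first := PySem.List.slice l (some 0) (some midpoint)
    let second := PySem.List.slice l (some (midpoint + 1)) none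
    let inverted := (PySem.List.pyRange ((second.length : Int) - 1) (-1) (-1)).foldl
        (fun acc i => acc ++ [PySem.List.pyGetD second i ' ']) ([] : List Char)
    if inverted = first then midpoint else -1

-- ===== PORT B =====
-- the `for i in range(m)` loop with early `return -1`
def solution_alt_loop (l : List Char) (n m i : Nat) : Int :=
  if _h : i < m then
    if PySem.List.pyGetD l (i : Int) ' ' ≠ PySem.List.pyGetD l ((n : Int) - 1 - (i : Int)) ' ' then -1
    else solution_alt_loop l n m (i + 1)
  else (m : Int)
termination_by m - i

def solution_alt (S : String) : Int :=
  let l := S.toList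
  let n := l.length
  if n = 0 then -1
  else if n = 1 then 0
  else if n % 2 = 0 then -1
  else solution_alt_loop l n ((n - 1) / 2) 0

-- ===== PRECONDITION & SPEC =====
def Spec_solution (S : String) (out : Int) : Prop := out = solution_alt S
instance (S : String) (out : Int) : Decidable (Spec_solution S out) := by unfold Spec_solution; infer_instance

-- ===== CLAIM (what is proved, stated in full; the proofs are below) =====
def Claim_equal_solution : Prop := ∀ (S : String), Dom_solution S → Spec_solution S (solution S)

-- ===== LEMMAS AND PROOFS =====

-- B's loop computes: m if S[j] = S[n-1-j] for all remaining j, else -1.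
lemma loop_spec (l : List Char) (n m i : Nat) (hmn : m < n) :
    solution_alt_loop l n m i =
      if ∀ j, i ≤ j → j < m → l.getD j ' ' = l.getD (n - 1 - j) ' ' then (m : Int) else -1 := by
  fun_induction solution_alt_loop l n m i with
  | case1 h hlt hne =>
    have hc : ((n : Int) - 1 - (h : Int)) = ((n - 1 - h : Nat) : Int) := by omega
    rw [hc] at hne
    simp only [PySem.List.pyGetD_natCast] at hne
    rw [if_neg]
    intro hall
    exact hne (by simpa using hall h le_rfl hlt)
  | case2 h hlt heq ih =>
    have hc : ((n : Int) - 1 - (h : Int)) = ((n - 1 - h : Nat) : Int) := by omega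
    rw [hc] at heq
    simp only [PySem.List.pyGetD_natCast, not_not] at heq
    rw [ih]
    have hx : (∀ j, h + 1 ≤ j → j < m → l.getD j ' ' = l.getD (n - 1 - j) ' ')
        ↔ (∀ j, h ≤ j → j < m → l.getD j ' ' = l.getD (n - 1 - j) ' ') := by
      constructor
      · intro H j hj1 hj2
        rcases eq_or_lt_of_le hj1 with rfl | hlt'
        · simpa using heq
        · exact H j hlt' hj2
      · intro H j hj1 hj2
        exact H j (Nat.le_of_succ_le hj1) hj2
    simp only [hx]
  | case3 h hge =>
    rw [if_pos]
    intro j hj1 hj2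
    exact absurd (Nat.lt_of_le_of_lt hj1 hj2) hge

-- A's comparison "reversed second half = first half" is pointwise mirror symmetry.
lemma rev_drop_eq_take_iff (l : List Char) (m : Nat) (h : l.length = 2 * m + 1) :
    ((l.drop (m + 1)).reverse = l.take m) ↔
      (∀ j, j < m → l.getD j ' ' = l.getD (l.length - 1 - j) ' ') := by
  have hld : (l.drop (m + 1)).length = m := by simp [h]; omega
  have hlt : (l.take m).length = m := by simp [h]; omega
  constructor
  · intro heq j hj
    have h1 : j < l.length := by omega
    have h2 : l.length - 1 - j < l.length := by omega
    rw [List.getD_eq_getElem l ' ' h1, List.getD_eq_getElem l ' ' h2]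
    have := congrArg (fun t => t.getD j ' ') heq
    simp only at this
    have hjr : j < (l.drop (m + 1)).reverse.length := by simp [hld]; omega
    rw [List.getD_eq_getElem _ ' ' hjr, List.getD_eq_getElem _ ' ' (by simpa [hlt] using hj)] at this
    rw [List.getElem_reverse, List.getElem_drop, List.getElem_take] at this
    have harg : m + 1 + ((l.drop (m+1)).length - 1 - j) = l.length - 1 - j := by omega
    simp only [harg] at this
    exact this.symm
  · intro H
    apply List.ext_getElem
    · simp [hld, hlt]
    · intro i h1 h2
      rw [List.getElem_reverse, List.getElem_drop, List.getElem_take]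
      have hi : i < m := by simpa [hlt] using h2
      have harg : m + 1 + ((l.drop (m+1)).length - 1 - i) = l.length - 1 - i := by omega
      simp only [harg]
      have := H i hi
      rw [List.getD_eq_getElem l ' ' (by omega), List.getD_eq_getElem l ' ' (by omega)] at this
      exact this.symm

-- ===== VERDICT (by name: the statement is the Claim_ definition above) =====
theorem solution_spec : Claim_equal_solution := by
  intro S _
  unfold Spec_solution solution solution_alt
  simp only []
  by_cases h0 : S.toList = []
  · simp [h0]
  · have hn0 : S.toList.length ≠ 0 := by simpa [List.length_eq_zero_iff] using h0
    rw [if_neg h0, if_neg hn0]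
    by_cases h1 : S.toList.length = 1
    · simp [h1]
    · rw [if_neg h1, if_neg h1]
      by_cases h2 : S.toList.length % 2 = 0
      · rw [if_pos (by omega), if_pos h2]
      · rw [if_neg (by omega), if_neg h2]
        set l := S.toList with hl
        set n := l.length with hn
        set m := (n - 1) / 2 with hmdef
        have hm : n = 2 * m + 1 := by omega
        have hmid : PySem.Int.floordiv ((n : Int) + 1) 2 - 1 = (m : Int) := by
          rw [PySem.Int.floordiv_eq_ediv_of_pos (by omega)]; omega
        rw [hmid]
        have hfirst : PySem.List.slice l (some 0) (some (m : Int)) = l.take m := by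
          rw [PySem.List.slice_zero_start, PySem.List.slice_to_natCast]
        have hsecond : PySem.List.slice l (some ((m : Int) + 1)) none = l.drop (m + 1) := by
          have : ((m : Int) + 1) = ((m + 1 : Nat) : Int) := by omega
          rw [this, PySem.List.slice_from_natCast]
        rw [hfirst, hsecond]
        have hinv : (PySem.List.pyRange (((l.drop (m+1)).length : Int) - 1) (-1) (-1)).foldl
            (fun acc i => acc ++ [PySem.List.pyGetD (l.drop (m+1)) i ' ']) ([] : List Char)
            = (l.drop (m + 1)).reverse := by
          rw [PySem.List.foldl_append_singleton_eq_map]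
          rw [PySem.List.pyRange_neg_one_eq_reverse]
          rw [show ((-1 : Int) + 1) = 0 from rfl]
          rw [show (((l.drop (m+1)).length : Int) - 1 + 1) = ((l.drop (m+1)).length : Int) from by ring]
          rw [List.map_reverse]
          rw [PySem.List.map_pyGetD_pyRange_zero', List.nil_append]
        rw [hinv]
        rw [loop_spec l n m 0 (by omega)]
        apply if_congr _ rfl rfl
        constructor
        · intro H j _ hj
          exact (rev_drop_eq_take_iff l m (by omega)).mp H j hj
        · intro H
          exact (rev_drop_eq_take_iff l m (by omega)).mpr (fun j hj => H j (Nat.zero_le j) hj)
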